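-- pv_equiv track=rewrite | github.com/tdchristian/doc-exercises | src/02/solutions/sol_02_02.py | is_mixed_case
-- ===== SOURCE A (Python) =====
-- def is_mixed_case(s: str) -> bool:
--     """
--     Return True iff a contains at least one lowercase
--     and one uppercase letter.
--     """
--
--     found_upper = False
--     found_lower = False
--
--     for char in s:
--
--         if char.isupper():
--             found_upper = True
--
--         elif char.islower():
--             found_lower = True
--
--     return found_upper and found_lower
-- ===== SOURCE B (Python) =====
-- def is_mixed_case(s: str) -> bool:
--     return any(c.isupper() for c in s) and any(c.islower() for c in s)
-- ===== Notes on version B (the rewrite author's own statement) =====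
-- stated objective: idiomatic
-- what changed: Replaces the single flag-accumulating loop with two independent short-circuiting existence scans (any over isupper, any over islower).
import Mathlib
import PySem

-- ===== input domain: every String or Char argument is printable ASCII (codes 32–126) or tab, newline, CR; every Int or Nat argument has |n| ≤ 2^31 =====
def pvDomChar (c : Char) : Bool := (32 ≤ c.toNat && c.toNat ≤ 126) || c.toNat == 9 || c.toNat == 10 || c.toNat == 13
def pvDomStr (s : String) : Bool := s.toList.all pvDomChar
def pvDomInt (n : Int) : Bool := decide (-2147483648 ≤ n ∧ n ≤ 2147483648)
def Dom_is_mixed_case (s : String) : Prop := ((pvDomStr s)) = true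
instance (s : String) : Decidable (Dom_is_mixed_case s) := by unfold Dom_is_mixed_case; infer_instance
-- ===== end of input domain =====

-- B replaces the single flag-accumulating loop with two independent short-circuiting existence scans (idiomatic).
-- ===== PORT A =====
def is_mixed_case (s : String) : Bool :=
  let r := s.toList.foldl (fun (st : Bool × Bool) char =>
    if PySem.Str.isupper char then (true, st.2)
    else if PySem.Str.islower char then (st.1, true)
    else st) (false, false)
  r.1 && r.2

-- ===== PORT B =====
def is_mixed_case_alt (s : String) : Bool :=
  (s.toList.any (fun c => PySem.Str.isupper c)) && (s.toList.any (fun c => PySem.Str.islower c))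

-- ===== PRECONDITION & SPEC =====
def Spec_is_mixed_case (s : String) (out : Bool) : Prop := out = is_mixed_case_alt s
instance (s : String) (out : Bool) : Decidable (Spec_is_mixed_case s out) := by unfold Spec_is_mixed_case; infer_instance

-- ===== CLAIM (what is proved, stated in full; the proofs are below) =====
def Claim_equal_is_mixed_case : Prop := ∀ (s : String), Dom_is_mixed_case s → Spec_is_mixed_case s (is_mixed_case s)

-- ===== LEMMAS AND PROOFS =====

-- ===== VERDICT (by name: the statement is the Claim_ definition above) =====
theorem foldl_flags (l : List Char) (u v : Bool) :
    (l.foldl (fun (st : Bool × Bool) char =>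
      if PySem.Str.isupper char then (true, st.2)
      else if PySem.Str.islower char then (st.1, true)
      else st) (u, v))
    = (u || l.any (fun c => PySem.Str.isupper c), v || l.any (fun c => PySem.Str.islower c)) := by
  induction l generalizing u v with
  | nil => simp
  | cons c t ih =>
    simp only [List.foldl_cons, List.any_cons]
    by_cases hu : PySem.Str.isupper c
    · have hl : PySem.Str.islower c = false := by
        simp [PySem.Str.isupper, PySem.Str.islower, PySem.Chars.isupper, PySem.Chars.islower, Char.le_def, UInt32.le_iff_toNat_le] at hu ⊢; omega
      simp [hu, hl, ih]
    · by_cases hl : PySem.Str.islower c <;> simp [hu, hl, ih]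

theorem is_mixed_case_spec : Claim_equal_is_mixed_case := by
  intro s _
  unfold Spec_is_mixed_case is_mixed_case is_mixed_case_alt
  simp [foldl_flags]
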